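-- pv_equiv track=rewrite | github.com/russellfenn/AoC | 2022/d07.py | separate_commands
-- ===== SOURCE A (Python) =====
-- Command = list[str]  # This will be the command and its output
--
-- def separate_commands(commands: list[str]) -> list[Command]:
--     """Commands start with '$'. Return each command and its output
--        as a list of strings.
--     """
--     output: list[list[str]] = list()
--     buffer: list[str] = list()
--     for line in commands:
--         if line.startswith('$'):
--             # finish last command and start a new one
--             if buffer:
--                 output.append(buffer)
--                 buffer = list()
--             buffer.append(line)
--         else:
--             buffer.append(line)
--     if buffer:
--         output.append(buffer)
--     return output
-- ===== SOURCE B (Python) =====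
-- def separate_commands(commands: list) -> list:
--     """Recursive slicing: each group is the command line plus the run of
--     non-'$' lines after it; no mutable buffer state."""
--     if not commands:
--         return []
--     i = 1
--     while i < len(commands) and not commands[i].startswith('$'):
--         i += 1
--     return [commands[:i]] + separate_commands(commands[i:])
-- ===== Notes on version B (the rewrite author's own statement) =====
-- stated objective: alternative
-- what changed: Replaces the stateful buffer-accumulating single pass with a recursive decomposition that finds the end of each group by scanning to the next '$' line and slices the group off directly.
import Mathlib
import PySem

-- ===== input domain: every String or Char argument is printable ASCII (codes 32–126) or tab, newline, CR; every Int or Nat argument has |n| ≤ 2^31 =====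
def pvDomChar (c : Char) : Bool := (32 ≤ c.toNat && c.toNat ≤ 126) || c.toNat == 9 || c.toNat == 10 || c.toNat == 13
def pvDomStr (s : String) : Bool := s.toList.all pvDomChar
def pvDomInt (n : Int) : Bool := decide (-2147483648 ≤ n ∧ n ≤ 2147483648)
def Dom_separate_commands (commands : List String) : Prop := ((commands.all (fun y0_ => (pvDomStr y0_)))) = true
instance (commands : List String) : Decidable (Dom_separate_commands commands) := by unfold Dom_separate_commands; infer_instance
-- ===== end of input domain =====

-- B replaces A's stateful buffer accumulation by recursive slicing at the next '$' line (alternative decomposition, same cost).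

-- ===== PORT A =====
-- step of A's for-loop over (output, buffer)
def sepStepA (s : List (List String) × List String) (line : String) :
    List (List String) × List String :=
  if PySem.Str.startswith line "$" then
    if s.2 ≠ [] then (s.1 ++ [s.2], [line]) else (s.1, s.2 ++ [line])
  else (s.1, s.2 ++ [line])

def separate_commands (commands : List String) : List (List String) :=
  let st := commands.foldl sepStepA ([], [])
  if st.2 ≠ [] then st.1 ++ [st.2] else st.1

-- ===== PORT B =====
-- "i < len and not startswith '$'": the scan condition of B's inner while loop
def sepCont (l : String) : Bool := !(PySem.Str.startswith l "$")

def separate_commands_alt : List String → List (List String)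
  | [] => []
  | x :: xs =>
      (x :: xs.takeWhile sepCont) :: separate_commands_alt (xs.dropWhile sepCont)
termination_by l => l.length
decreasing_by
  exact Nat.lt_succ_of_le (List.length_dropWhile_le _ _)

-- ===== PRECONDITION & SPEC =====
def Spec_separate_commands (commands : List String) (out : List (List String)) : Prop := out = separate_commands_alt commands
instance (commands : List String) (out : List (List String)) : Decidable (Spec_separate_commands commands out) := by unfold Spec_separate_commands; infer_instance

-- ===== CLAIM (what is proved, stated in full; the proofs are below) =====
def Claim_equal_separate_commands : Prop := ∀ (commands : List String), Dom_separate_commands commands → Spec_separate_commands commands (separate_commands commands)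

-- ===== LEMMAS AND PROOFS =====

def sepFinish (s : List (List String) × List String) : List (List String) :=
  if s.2 ≠ [] then s.1 ++ [s.2] else s.1

-- A's loop from a nonempty buffer: flushes (buf ++ run of non-'$' lines) then behaves like B
theorem sepA_invariant (cs : List String) :
    ∀ (out : List (List String)) (buf : List String), buf ≠ [] →
      sepFinish (cs.foldl sepStepA (out, buf)) =
        out ++ ((buf ++ cs.takeWhile sepCont) :: separate_commands_alt (cs.dropWhile sepCont)) := by
  induction cs with
  | nil =>
      intro out buf hbuf
      simp [sepFinish, hbuf, separate_commands_alt]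
  | cons c cs ih =>
      intro out buf hbuf
      by_cases h : PySem.Str.startswith c "$"
      · have hc : sepCont c = false := by simp [sepCont, PySem.Str.startswith] at h ⊢; simp [h]
        rw [List.foldl_cons]
        have hstep : sepStepA (out, buf) c = (out ++ [buf], [c]) := by
          simp [sepStepA, PySem.Str.startswith] at h ⊢; simp [h, hbuf]
        rw [hstep, ih (out ++ [buf]) [c] (by simp)]
        rw [List.takeWhile_cons_of_neg (by simp [hc]), List.dropWhile_cons_of_neg (by simp [hc])]
        rw [separate_commands_alt]
        simp
      · have hc : sepCont c = true := by simp [sepCont, PySem.Str.startswith] at h ⊢; simp [h]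
        rw [List.foldl_cons]
        have hstep : sepStepA (out, buf) c = (out, buf ++ [c]) := by
          simp [sepStepA, PySem.Str.startswith] at h ⊢; simp [h]
        rw [hstep, ih out (buf ++ [c]) (by simp)]
        rw [List.takeWhile_cons_of_pos hc, List.dropWhile_cons_of_pos hc]
        simp

-- ===== VERDICT (by name: the statement is the Claim_ definition above) =====
theorem separate_commands_spec : Claim_equal_separate_commands := by
  intro commands _
  unfold Spec_separate_commands separate_commands
  cases commands with
  | nil => simp [sepFinish, separate_commands_alt]
  | cons c cs =>
      have hstep : sepStepA ([], []) c = ([], [c]) := by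
        by_cases h : PySem.Str.startswith c "$" <;> simp [sepStepA, h]
      show sepFinish (List.foldl sepStepA ([], []) (c :: cs)) = _
      rw [List.foldl_cons, hstep, sepA_invariant cs [] [c] (by simp)]
      rw [separate_commands_alt]
      simp
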